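-- pv_equiv track=rewrite | github.com/Queue-Mem/queue-mem-experiments | scripts/plot.py | compute_reordering_extent
-- ===== SOURCE A (Python) =====
-- def compute_reordering_extent(seq_list):
--     extents = []
--     for i in range(len(seq_list)):
--         s_i = seq_list[i]
--         for j in range(i):
--             if seq_list[j] > s_i:
--                 e = i - j
--                 extents.append(e)
--                 break
--     return extents
-- ===== SOURCE B (Python) =====
-- def compute_reordering_extent(seq_list):
--     extents = []
--     maxima = []  # (value, index) of strict prefix maxima; values strictly increasing
--     for i in range(len(seq_list)):
--         s = seq_list[i]
--         # binary search for first maxima entry with value > s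
--         lo, hi = 0, len(maxima)
--         while lo < hi:
--             mid = (lo + hi) // 2
--             if maxima[mid][0] > s:
--                 hi = mid
--             else:
--                 lo = mid + 1
--         if lo < len(maxima):
--             extents.append(i - maxima[lo][1])
--         if not maxima or s > maxima[-1][0]:
--             maxima.append((s, i))
--     return extents
-- ===== Notes on version B (the rewrite author's own statement) =====
-- stated objective: faster
-- what changed: Replaces A's inner linear scan over all earlier elements by a maintained strictly-increasing list of strict prefix maxima queried with a hand-written binary search for the first maximum exceeding the current value.
import Mathlib
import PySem

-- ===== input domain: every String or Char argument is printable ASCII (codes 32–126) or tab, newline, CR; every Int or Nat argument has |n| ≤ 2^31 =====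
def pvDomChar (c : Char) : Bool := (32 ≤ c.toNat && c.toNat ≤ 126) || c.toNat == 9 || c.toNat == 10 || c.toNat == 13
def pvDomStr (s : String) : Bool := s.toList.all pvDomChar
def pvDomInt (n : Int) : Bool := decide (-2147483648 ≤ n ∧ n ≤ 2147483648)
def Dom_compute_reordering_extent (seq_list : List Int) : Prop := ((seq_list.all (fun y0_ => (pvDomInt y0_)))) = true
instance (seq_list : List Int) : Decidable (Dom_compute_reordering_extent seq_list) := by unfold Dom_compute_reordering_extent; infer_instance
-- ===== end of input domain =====

-- B replaces A's inner backwards-compatible linear scan by a maintained list of strict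
-- prefix maxima plus a hand-written binary search (O(n log n) instead of O(n^2)).

-- ===== PORT A =====
-- A's inner `for j in range(i): if seq_list[j] > s_i: append; break` is the first match
-- over range i; indices are always in range, so `getD _ 0` is exact.
def compute_reordering_extent (seq_list : List Int) : List Int :=
  (List.range seq_list.length).foldl
    (fun extents i =>
      let s_i := seq_list.getD i 0
      match (List.range i).find? (fun j => decide (seq_list.getD j 0 > s_i)) with
      | some j => extents ++ [(i : Int) - (j : Int)]
      | none => extents)
    []

-- ===== PORT B =====
-- binary search: first index k in [lo,hi) with maxima[k].1 > s, else hi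
def ceBsearch (maxima : List (Int × Nat)) (s : Int) (lo hi : Nat) : Nat :=
  if h : lo < hi then
    let mid := (lo + hi) / 2
    if (maxima.getD mid (0, 0)).1 > s then ceBsearch maxima s lo mid
    else ceBsearch maxima s (mid + 1) hi
  else lo
termination_by hi - lo
decreasing_by all_goals omega

-- one iteration of B's loop: state = (extents, maxima)
def ceBstep (seq : List Int) (st : List Int × List (Int × Nat)) (i : Nat) :
    List Int × List (Int × Nat) :=
  let s := seq.getD i 0
  let m := st.2
  let lo := ceBsearch m s 0 m.length
  let extents := if lo < m.length then st.1 ++ [(i : Int) - ((m.getD lo (0, 0)).2 : Int)] else st.1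
  let m' :=
    match m.getLast? with
    | none => m ++ [(s, i)]
    | some p => if p.1 < s then m ++ [(s, i)] else m
  (extents, m')

def compute_reordering_extent_alt (seq_list : List Int) : List Int :=
  ((List.range seq_list.length).foldl (ceBstep seq_list) ([], [])).1

-- ===== PRECONDITION & SPEC =====
def Spec_compute_reordering_extent (seq_list : List Int) (out : List Int) : Prop := out = compute_reordering_extent_alt seq_list
instance (seq_list : List Int) (out : List Int) : Decidable (Spec_compute_reordering_extent seq_list out) := by unfold Spec_compute_reordering_extent; infer_instance

-- ===== CLAIM (what is proved, stated in full; the proofs are below) =====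
def Claim_equal_compute_reordering_extent : Prop := ∀ (seq_list : List Int), Dom_compute_reordering_extent seq_list → Spec_compute_reordering_extent seq_list (compute_reordering_extent seq_list)

-- ===== LEMMAS AND PROOFS =====

-- the maxima list after processing the first n elements (mirrors ceBstep's update)
def cePm (seq : List Int) : Nat → List (Int × Nat)
  | 0 => []
  | n + 1 =>
    let m := cePm seq n
    match m.getLast? with
    | none => m ++ [(seq.getD n 0, n)]
    | some p => if p.1 < seq.getD n 0 then m ++ [(seq.getD n 0, n)] else m

-- invariants of the prefix-maxima list
theorem cePm_inv (seq : List Int) (n : Nat) :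
    (∀ p ∈ cePm seq n, p.2 < n ∧ p.1 = seq.getD p.2 0)
    ∧ List.Pairwise (fun a b : Int × Nat => a.1 < b.1) (cePm seq n)
    ∧ (∀ j, j < n → ∃ q, (cePm seq n).getLast? = some q ∧ seq.getD j 0 ≤ q.1) := by
  induction n with
  | zero => simp [cePm]
  | succ n ih =>
    obtain ⟨hmem, hpw, hmax⟩ := ih
    show (∀ p ∈ cePm seq (n+1), p.2 < n+1 ∧ p.1 = seq.getD p.2 0)
      ∧ List.Pairwise (fun a b : Int × Nat => a.1 < b.1) (cePm seq (n+1))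
      ∧ (∀ j, j < n+1 → ∃ q, (cePm seq (n+1)).getLast? = some q ∧ seq.getD j 0 ≤ q.1)
    rw [cePm]
    cases hlast : (cePm seq n).getLast? with
    | none =>
      have hnil : cePm seq n = [] := List.getLast?_eq_none_iff.mp hlast
      have hn0 : n = 0 := by
        by_contra h
        obtain ⟨q, hq, _⟩ := hmax 0 (by omega)
        rw [hlast] at hq; simp at hq
      subst hn0
      refine ⟨?_, ?_, ?_⟩
      · intro p hp
        simp [hnil] at hp
        subst hp; simp
      · simp [hnil]
      · intro j hj
        have : j = 0 := by omega
        subst this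
        exact ⟨(seq.getD 0 0, 0), by simp [hnil], le_refl _⟩
    | some q =>
      have hq_mem : q ∈ cePm seq n := List.mem_of_getLast? hlast
      have hq_le : ∀ p ∈ cePm seq n, p.1 ≤ q.1 := by
        intro p hp
        obtain ⟨hp2, hp1⟩ := hmem p hp
        obtain ⟨q', hq', hle⟩ := hmax p.2 hp2
        rw [hlast] at hq'
        cases hq'
        rw [← hp1] at hle; exact hle
      by_cases hc : q.1 < seq.getD n 0
      · simp only [hc, if_true]
        refine ⟨?_, ?_, ?_⟩
        · intro p hp
          rcases List.mem_append.mp hp with h | h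
          · obtain ⟨h2, h1⟩ := hmem p h; exact ⟨by omega, h1⟩
          · simp at h; subst h; simp
        · rw [List.pairwise_append]
          refine ⟨hpw, by simp, ?_⟩
          intro a ha b hb
          simp at hb; subst hb
          calc a.1 ≤ q.1 := hq_le a ha
            _ < seq.getD n 0 := hc
        · intro j hj
          refine ⟨(seq.getD n 0, n), by simp, ?_⟩
          by_cases hjn : j < n
          · obtain ⟨q', hq', hle⟩ := hmax j hjn
            rw [hlast] at hq'; cases hq'
            exact le_of_lt (lt_of_le_of_lt hle hc)
          · have : j = n := by omega
            subst this; exact le_refl _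
      · simp only [hc, if_false]
        refine ⟨fun p hp => ⟨by have := (hmem p hp).1; omega, (hmem p hp).2⟩, hpw, ?_⟩
        intro j hj
        by_cases hjn : j < n
        · exact hmax j hjn
        · have : j = n := by omega
          subst this
          exact ⟨q, hlast, by omega⟩
-- find? on the prefix-maxima list agrees with find? on range n
theorem cePm_find (seq : List Int) (n : Nat) (s : Int) :
    (cePm seq n).find? (fun p => decide (p.1 > s)) =
      ((List.range n).find? (fun j => decide (seq.getD j 0 > s))).map
        (fun j => (seq.getD j 0, j)) := by
  induction n with
  | zero => simp [cePm]
  | succ n ih =>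
    obtain ⟨hmem, _, hmax⟩ := cePm_inv seq n
    rw [List.range_succ, List.find?_append]
    show (cePm seq (n+1)).find? (fun p => decide (p.1 > s)) = _
    rw [cePm]
    cases hfr : (List.range n).find? (fun j => decide (seq.getD j 0 > s)) with
    | some j =>
      -- found earlier: the maxima list already contains the hit, appending cannot change it
      have hpm : (cePm seq n).find? (fun p => decide (p.1 > s)) = some (seq.getD j 0, j) := by
        rw [ih, hfr]; rfl
      cases hlast : (cePm seq n).getLast? with
      | none =>
        rw [List.find?_append, hpm]; simp
      | some q =>
        by_cases hc : q.1 < seq.getD n 0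
        · simp only [hc, if_true]
          rw [List.find?_append, hpm]; simp
        · simp only [hc, if_false]
          rw [hpm]; simp
    | none =>
      -- nothing earlier exceeds s: every value in the maxima list is ≤ s
      have hall : ∀ p ∈ cePm seq n, ¬ (p.1 > s) := by
        intro p hp
        obtain ⟨h2, h1⟩ := hmem p hp
        have := List.find?_eq_none.mp hfr p.2 (by simpa using h2)
        rw [h1]; simpa using this
      have hpm : (cePm seq n).find? (fun p => decide (p.1 > s)) = none := by
        rw [ih, hfr]; rfl
      cases hlast : (cePm seq n).getLast? with
      | none =>
        rw [List.find?_append, hpm]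
        simp only [Option.none_or]
        simp
      | some q =>
        have hq_le_s : q.1 ≤ s := by
          have hq_mem := List.mem_of_getLast? hlast
          have := hall q hq_mem; omega
        by_cases hc : q.1 < seq.getD n 0
        · simp only [hc, if_true]
          rw [List.find?_append, hpm]
          simp only [Option.none_or]
          simp
        · -- not appended; but then seq[n] ≤ q.1 ≤ s, so the new element fails too
          simp only [hc, if_false]
          rw [hpm]
          have hs : ¬ seq.getD n 0 > s := by omega
          simp
          simpa [List.getD] using hs
-- findIdx characterisation
theorem ceFindIdx_char (p : Int × Nat → Bool) (l : List (Int × Nat)) (r : Nat)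
    (hr : r ≤ l.length)
    (hlt : ∀ k, k < r → ¬ p (l.getD k (0, 0)) = true)
    (hat : r < l.length → p (l.getD r (0, 0)) = true) :
    l.findIdx p = r := by
  induction l generalizing r with
  | nil => simp at hr; simp [hr]
  | cons x xs ih =>
    cases r with
    | zero =>
      have := hat (by simp)
      simp [List.findIdx_cons] at this ⊢
      simp [this]
    | succ r' =>
      have h0 : ¬ p x = true := by have := hlt 0 (by omega); simpa using this
      rw [List.findIdx_cons]
      simp only [Bool.not_eq_true] at h0
      rw [h0]
      simp only [cond_false]
      have := ih r' (by simpa using hr)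
        (fun k hk => by have := hlt (k+1) (by omega); simpa using this)
        (fun h => by have := hat (by simpa using h); simpa using this)
      omega
theorem ceFind?_none_findIdx (p : Int × Nat → Bool) (l : List (Int × Nat))
    (h : l.find? p = none) : l.findIdx p = l.length := by
  induction l with
  | nil => simp
  | cons x xs ih =>
    rw [List.find?_cons] at h
    cases hx : p x with
    | true => simp [hx] at h
    | false =>
      rw [hx] at h
      rw [List.findIdx_cons, hx]
      simp [ih h]
theorem ceFind?_some_findIdx (p : Int × Nat → Bool) (l : List (Int × Nat)) (x : Int × Nat)
    (h : l.find? p = some x) :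
    l.findIdx p < l.length ∧ l.getD (l.findIdx p) (0, 0) = x := by
  induction l with
  | nil => simp at h
  | cons y ys ih =>
    rw [List.find?_cons] at h
    cases hy : p y with
    | true =>
      rw [hy] at h
      simp at h
      subst h
      simp [List.findIdx_cons, hy]
    | false =>
      rw [hy] at h
      rw [List.findIdx_cons, hy]
      obtain ⟨h1, h2⟩ := ih h
      simp only [cond_false]
      constructor
      · simpa using h1
      · simpa using h2
-- binary search computes findIdx on a monotone predicate
theorem ceBsearch_spec (m : List (Int × Nat)) (s : Int)
    (mono : ∀ i j : Nat, i ≤ j → j < m.length →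
      (m.getD i (0, 0)).1 > s → (m.getD j (0, 0)).1 > s) :
    ∀ d lo hi, hi - lo ≤ d → lo ≤ hi → hi ≤ m.length →
      (∀ k, k < lo → ¬ (m.getD k (0, 0)).1 > s) →
      (∀ k, hi ≤ k → k < m.length → (m.getD k (0, 0)).1 > s) →
      ceBsearch m s lo hi = m.findIdx (fun p => decide (p.1 > s)) := by
  intro d
  induction d with
  | zero =>
    intro lo hi hd hle hhi hlow hhigh
    have : lo = hi := by omega
    subst this
    rw [ceBsearch]
    simp only [lt_irrefl, dite_false]
    exact (ceFindIdx_char _ m lo (by omega)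
      (fun k hk => by simpa using hlow k hk)
      (fun h => by simpa using hhigh lo (le_refl _) h)).symm
  | succ d ih =>
    intro lo hi hd hle hhi hlow hhigh
    rw [ceBsearch]
    by_cases h : lo < hi
    · simp only [h, dite_true]
      set mid := (lo + hi) / 2 with hmid
      have hm1 : lo ≤ mid := by omega
      have hm2 : mid < hi := by omega
      by_cases hp : (m.getD mid (0, 0)).1 > s
      · simp only [hp, if_true]
        exact ih lo mid (by omega) (by omega) (by omega) hlow
          (fun k hk1 hk2 => mono mid k hk1 hk2 hp)
      · simp only [hp, if_false]
        exact ih (mid + 1) hi (by omega) (by omega) hhi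
          (fun k hk => by
            by_cases hklo : k < lo
            · exact hlow k hklo
            · intro hc
              exact hp (mono k mid (by omega) (by omega) hc))
          hhigh
    · simp only [h, dite_false]
      have : lo = hi := by omega
      subst this
      exact (ceFindIdx_char _ m lo (by omega)
        (fun k hk => by simpa using hlow k hk)
        (fun h => by simpa using hhigh lo (le_refl _) h)).symm
-- one step of B's fold, run on the lock-step state, matches one step of A's fold
theorem ceStep_eq (seq : List Int) (acc : List Int) (n : Nat) :
    ceBstep seq (acc, cePm seq n) n =
      ((let s_i := seq.getD n 0
        match (List.range n).find? (fun j => decide (seq.getD j 0 > s_i)) with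
        | some j => acc ++ [(n : Int) - (j : Int)]
        | none => acc), cePm seq (n + 1)) := by
  obtain ⟨hmem, hpw, _⟩ := cePm_inv seq n
  set s := seq.getD n 0 with hs
  set m := cePm seq n with hm
  have mono : ∀ i j : Nat, i ≤ j → j < m.length →
      (m.getD i (0, 0)).1 > s → (m.getD j (0, 0)).1 > s := by
    intro i j hij hj hi
    rcases Nat.lt_or_ge i j with hlt | hge
    · have hi' : i < m.length := by omega
      have := (List.pairwise_iff_getElem.mp hpw) i j hi' hj hlt
      rw [List.getD_eq_getElem m (0,0) hi', List.getD_eq_getElem m (0,0) hj] at *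
      omega
    · have : i = j := by omega
      subst this; exact hi
  have hbs : ceBsearch m s 0 m.length = m.findIdx (fun p => decide (p.1 > s)) :=
    ceBsearch_spec m s mono m.length 0 m.length (by omega) (by omega) (le_refl _)
      (fun k hk => by omega) (fun k hk1 hk2 => by omega)
  have hfind := cePm_find seq n s
  rw [← hm] at hfind
  unfold ceBstep
  simp only [← hs, hbs]
  have hpm1 : (match m.getLast? with
      | none => m ++ [(s, n)]
      | some p => if p.1 < s then m ++ [(s, n)] else m) = cePm seq (n + 1) := by
    rw [cePm, ← hm, ← hs]
  cases hfr : (List.range n).find? (fun j => decide (seq.getD j 0 > s)) with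
  | some j =>
    have : m.find? (fun p => decide (p.1 > s)) = some (seq.getD j 0, j) := by
      rw [hfind, hfr]; rfl
    obtain ⟨h1, h2⟩ := ceFind?_some_findIdx _ m _ this
    simp only [h1, if_true, h2, hpm1]
  | none =>
    have : m.find? (fun p => decide (p.1 > s)) = none := by
      rw [hfind, hfr]; rfl
    have h1 := ceFind?_none_findIdx _ m this
    simp only [h1, lt_irrefl, if_false, hpm1]

-- the two folds run in lock-step
theorem ceLoop_eq (seq : List Int) (n : Nat) :
    (List.range n).foldl (ceBstep seq) ([], []) =
      ((List.range n).foldl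
        (fun extents i =>
          let s_i := seq.getD i 0
          match (List.range i).find? (fun j => decide (seq.getD j 0 > s_i)) with
          | some j => extents ++ [(i : Int) - (j : Int)]
          | none => extents)
        [], cePm seq n) := by
  induction n with
  | zero => simp [cePm]
  | succ n ih =>
    rw [List.range_succ, List.foldl_append, List.foldl_append, ih]
    simp only [List.foldl_cons, List.foldl_nil]
    exact ceStep_eq seq _ n

-- ===== VERDICT (by name: the statement is the Claim_ definition above) =====
theorem compute_reordering_extent_spec : Claim_equal_compute_reordering_extent := by
  intro seq _
  unfold Spec_compute_reordering_extent compute_reordering_extent compute_reordering_extent_alt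
  rw [ceLoop_eq]
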